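-- pv_equiv track=rewrite | github.com/GrupoLym/Proy0_Lym | model.py | extraer_corchetes_procesos
-- ===== SOURCE A (Python) =====
-- def extraer_corchetes_procesos(list):
--     interior_corchetes = []
--     switch = False
--
--     for token in list:
--         if token == "{":
--             switch = True
--         elif switch:
--             if token == "{":
--                 continue  # Ignorar el paréntesis de apertura
--             elif token == "}":
--                 break  # Salir cuando se encuentre el paréntesis de cierre
--             else:
--                 interior_corchetes.append(token)
--
--     return interior_corchetes
-- ===== SOURCE B (Python) =====
-- def extraer_corchetes_procesos(list):
--     try:
--         i = list.index("{")
--     except ValueError: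
--         return []
--     rest = list[i + 1:]
--     try:
--         rest = rest[:rest.index("}")]
--     except ValueError:
--         pass
--     return [t for t in rest if t != "{"]
-- ===== Notes on version B (the rewrite author's own statement) =====
-- stated objective: simpler
-- what changed: Replaces the stateful single-pass switch/break loop with locate-boundaries-then-slice: find the first '{' (ValueError -> []), slice after it, cut at the first '}' if any, and filter out interior '{' with a comprehension.
import Mathlib
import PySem

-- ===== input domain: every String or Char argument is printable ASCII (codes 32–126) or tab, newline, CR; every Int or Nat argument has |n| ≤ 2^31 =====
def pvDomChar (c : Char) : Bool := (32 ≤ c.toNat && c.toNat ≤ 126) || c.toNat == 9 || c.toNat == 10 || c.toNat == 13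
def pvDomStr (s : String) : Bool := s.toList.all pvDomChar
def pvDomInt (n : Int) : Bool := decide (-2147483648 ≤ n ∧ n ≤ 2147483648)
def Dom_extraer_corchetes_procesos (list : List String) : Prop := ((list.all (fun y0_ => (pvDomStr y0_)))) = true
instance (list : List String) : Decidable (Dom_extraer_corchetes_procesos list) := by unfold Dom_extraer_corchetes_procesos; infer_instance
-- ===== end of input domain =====

-- B replaces A's stateful switch/break single pass by locate-boundaries-then-slice (find '{', slice, cut at '}', filter): simpler decomposition, same cost.


-- ===== PORT A =====
-- A's for-loop with the 'switch' flag, appends and the break on "}" (break = return acc).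
def pvALoop : List String → Bool → List String → List String
  | [], _, acc => acc
  | t :: ts, sw, acc =>
    if t = "{" then pvALoop ts true acc
    else if sw then
      if t = "}" then acc
      else pvALoop ts sw (acc ++ [t])
    else pvALoop ts sw acc

def extraer_corchetes_procesos (list : List String) : List String :=
  pvALoop list false []

-- ===== PORT B =====
-- Source B: list.index("{") (ValueError -> []), slice after it, cut at first "}" if present, filter out "{".
def extraer_corchetes_procesos_alt (list : List String) : List String :=
  match PySem.List.index? list "{" with
  | none => []
  | some i =>
    let rest := list.drop (i + 1)
    let rest2 :=
      match PySem.List.index? rest "}" with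
      | none => rest
      | some j => rest.take j
    rest2.filter (fun t => t ≠ "{")

-- ===== PRECONDITION & SPEC =====
def Spec_extraer_corchetes_procesos (list : List String) (out : List String) : Prop := out = extraer_corchetes_procesos_alt list
instance (list : List String) (out : List String) : Decidable (Spec_extraer_corchetes_procesos list out) := by unfold Spec_extraer_corchetes_procesos; infer_instance

-- ===== CLAIM (what is proved, stated in full; the proofs are below) =====
def Claim_equal_extraer_corchetes_procesos : Prop := ∀ (list : List String), Dom_extraer_corchetes_procesos list → Spec_extraer_corchetes_procesos list (extraer_corchetes_procesos list)

-- ===== LEMMAS AND PROOFS =====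

-- With the switch on, the loop appends everything up to the first "}" (exclusive), skipping "{".
theorem pvALoop_on (ts acc : List String) :
    pvALoop ts true acc =
      acc ++ (match PySem.List.index? ts "}" with
              | none => ts.filter (fun t => t ≠ "{")
              | some j => (ts.take j).filter (fun t => t ≠ "{")) := by
  induction ts generalizing acc with
  | nil => simp [pvALoop, PySem.List.index?]
  | cons t ts ih =>
    by_cases ht : t = "{"
    · subst ht
      rw [show pvALoop ("{" :: ts) true acc = pvALoop ts true acc from rfl, ih]
      rw [PySem.List.index?_cons_of_ne ts (by decide : ("{" : String) ≠ "}")]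
      cases h : PySem.List.index? ts "}" with
      | none => simp
      | some j => simp
    · by_cases hc : t = "}"
      · subst hc
        rw [show pvALoop ("}" :: ts) true acc = acc from rfl,
            PySem.List.index?_cons_self]
        simp
      · rw [show pvALoop (t :: ts) true acc = pvALoop ts true (acc ++ [t]) from by
              simp [pvALoop, ht, hc], ih]
        rw [PySem.List.index?_cons_of_ne ts hc]
        cases h : PySem.List.index? ts "}" with
        | none => simp [ht]
        | some j => simp [ht]

-- With the switch off, the loop skips until the first "{" (or returns acc if none).
theorem pvALoop_off (ts acc : List String) :
    pvALoop ts false acc =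
      match PySem.List.index? ts "{" with
      | none => acc
      | some i => pvALoop (ts.drop (i + 1)) true acc := by
  induction ts with
  | nil => simp [pvALoop, PySem.List.index?]
  | cons t ts ih =>
    by_cases ht : t = "{"
    · subst ht
      rw [show pvALoop ("{" :: ts) false acc = pvALoop ts true acc from rfl,
          PySem.List.index?_cons_self]
      simp
    · rw [show pvALoop (t :: ts) false acc = pvALoop ts false acc from by
            simp [pvALoop, ht], ih]
      rw [PySem.List.index?_cons_of_ne ts ht]
      cases h : PySem.List.index? ts "{" with
      | none => rfl
      | some i => simp

-- ===== VERDICT (by name: the statement is the Claim_ definition above) =====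
theorem extraer_corchetes_procesos_spec : Claim_equal_extraer_corchetes_procesos := by
  intro list _
  show extraer_corchetes_procesos list = extraer_corchetes_procesos_alt list
  unfold extraer_corchetes_procesos extraer_corchetes_procesos_alt
  rw [pvALoop_off]
  cases h : PySem.List.index? list "{" with
  | none => rfl
  | some i =>
    simp only [pvALoop_on]
    cases h2 : PySem.List.index? (list.drop (i + 1)) "}" <;> simp
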